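-- pv_equiv track=rewrite | github.com/SirArchy/CoMa-2 | Python/CoMa_Proggen_HA7.py | _is_valid_triangles
-- ===== SOURCE A (Python) =====
-- def _is_valid_triangles(n, triangles):
--     expected_triangles_count = n - 2
--     if len(triangles) != expected_triangles_count:
--         return False
--
--     walls = {}
--     for triangle in triangles:
--         for i in range(3):
--             wall = tuple(sorted((triangle[i], triangle[(i + 1) % 3])))
--             if wall not in walls:
--                 walls[wall] = 0
--             walls[wall] += 1
--
--     for wall, count in walls.items():
--         # Jede Seite darf entweder einmal (Rand der Figur) oder zweimal (innen) vorkommen.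
--         if count > 2 or count < 1:
--             return False
--     return True
-- ===== SOURCE B (Python) =====
-- def _is_valid_triangles(n, triangles):
--     # Single pass: track edges seen once / seen twice; fail on a third occurrence.
--     if len(triangles) != n - 2:
--         return False
--     seen_once = set()
--     seen_twice = set()
--     for a, b, c in triangles:
--         for u, v in ((a, b), (b, c), (c, a)):
--             e = (u, v) if u <= v else (v, u)
--             if e in seen_twice:
--                 return False
--             if e in seen_once:
--                 seen_once.discard(e)
--                 seen_twice.add(e)
--             else:
--                 seen_once.add(e)
--     return True
-- ===== Notes on version B (the rewrite author's own statement) =====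
-- stated objective: simpler
-- what changed: Replaces the count dictionary plus a separate validation scan over its items by a single pass that keeps two sets (edges seen once / seen twice) and rejects immediately on a third occurrence of an edge.
import Mathlib
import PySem

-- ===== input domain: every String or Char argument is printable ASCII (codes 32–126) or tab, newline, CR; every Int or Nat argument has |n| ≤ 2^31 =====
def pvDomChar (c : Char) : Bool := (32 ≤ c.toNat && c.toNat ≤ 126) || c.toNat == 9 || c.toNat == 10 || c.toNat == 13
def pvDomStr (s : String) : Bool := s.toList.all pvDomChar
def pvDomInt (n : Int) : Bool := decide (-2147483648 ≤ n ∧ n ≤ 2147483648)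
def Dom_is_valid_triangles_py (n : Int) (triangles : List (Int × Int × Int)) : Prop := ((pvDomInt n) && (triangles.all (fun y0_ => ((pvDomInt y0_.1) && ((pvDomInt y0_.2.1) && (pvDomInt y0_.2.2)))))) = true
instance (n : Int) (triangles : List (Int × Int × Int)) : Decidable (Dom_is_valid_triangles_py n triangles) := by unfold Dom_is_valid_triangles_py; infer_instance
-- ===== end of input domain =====

-- B replaces A's count dictionary + separate validation scan by one pass over the edges with
-- two sets (seen once / seen twice) and an immediate failure on a third occurrence (objective: simpler).

-- ===== PORT A =====
-- triangle[i] on a 3-tuple, exact for i ∈ {0,1,2} (the only indices A uses)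
def pvTGet (t : Int × Int × Int) (i : Int) : Int :=
  if i = 0 then t.1 else if i = 1 then t.2.1 else t.2.2

-- body of A's inner loop: wall = tuple(sorted((triangle[i], triangle[(i+1)%3]))); walls[wall] += 1
def pvWallStep (walls : PySem.Dict (Int × Int) Int) (t : Int × Int × Int) (i : Int) :
    PySem.Dict (Int × Int) Int :=
  let x := pvTGet t i
  let y := pvTGet t (PySem.Int.mod (i + 1) 3)
  let wall := if x ≤ y then (x, y) else (y, x)   -- tuple(sorted(..)) of a 2-tuple of ints
  let walls := if walls.contains wall then walls else walls.insert wall 0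
  walls.modify wall 0 (· + 1)                    -- walls[wall] += 1 (key just ensured present)

def is_valid_triangles_py (n : Int) (triangles : List (Int × Int × Int)) : Bool :=
  let expected_triangles_count := n - 2
  if (triangles.length : Int) ≠ expected_triangles_count then false
  else
    let walls := triangles.foldl
      (fun walls triangle =>
        (PySem.List.pyRange 0 3 1).foldl (fun walls i => pvWallStep walls triangle i) walls)
      PySem.Dict.empty
    if walls.items.any (fun p => decide (p.2 > 2) || decide (p.2 < 1)) then false else true

-- ===== PORT B =====
def pvSortEdge (u v : Int) : Int × Int := if u ≤ v then (u, v) else (v, u)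

def pvEdgesB (t : Int × Int × Int) : List (Int × Int) :=
  [pvSortEdge t.1 t.2.1, pvSortEdge t.2.1 t.2.2, pvSortEdge t.2.2 t.1]

-- B's pass over the edges with the two sets; B's early `return False` ends the whole function,
-- so the nested loops are transcribed as one recursion over the flattened edge list.
def pvAltGo : List (Int × Int) → PySem.Set (Int × Int) → PySem.Set (Int × Int) → Bool
  | [], _, _ => true
  | e :: es, seen_once, seen_twice =>
    if seen_twice.contains e then false
    else if seen_once.contains e then pvAltGo es (seen_once.discard e) (seen_twice.add e)
    else pvAltGo es (seen_once.add e) seen_twice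

def is_valid_triangles_py_alt (n : Int) (triangles : List (Int × Int × Int)) : Bool :=
  if (triangles.length : Int) ≠ n - 2 then false
  else pvAltGo (triangles.flatMap pvEdgesB) PySem.Set.empty PySem.Set.empty

-- ===== PRECONDITION & SPEC =====
def Spec_is_valid_triangles_py (n : Int) (triangles : List (Int × Int × Int)) (out : Bool) : Prop := out = is_valid_triangles_py_alt n triangles
instance (n : Int) (triangles : List (Int × Int × Int)) (out : Bool) : Decidable (Spec_is_valid_triangles_py n triangles out) := by unfold Spec_is_valid_triangles_py; infer_instance

-- ===== CLAIM (what is proved, stated in full; the proofs are below) =====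
def Claim_equal_is_valid_triangles_py : Prop := ∀ (n : Int) (triangles : List (Int × Int × Int)), Dom_is_valid_triangles_py n triangles → Spec_is_valid_triangles_py n triangles (is_valid_triangles_py n triangles)

-- ===== LEMMAS AND PROOFS =====

-- A's per-edge dict update, as a function of the already-sorted edge
def pvStepA (d : PySem.Dict (Int × Int) Int) (e : Int × Int) : PySem.Dict (Int × Int) Int :=
  (if d.contains e then d else d.insert e 0).modify e 0 (· + 1)

lemma pvInner_eq (d : PySem.Dict (Int × Int) Int) (t : Int × Int × Int) :
    (PySem.List.pyRange 0 3 1).foldl (fun walls i => pvWallStep walls t i) d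
      = (pvEdgesB t).foldl pvStepA d := rfl

lemma pvStepA_eq (d : PySem.Dict (Int × Int) Int) (e : Int × Int) :
    pvStepA d e = d.modify e 0 (· + 1) := by
  unfold pvStepA
  by_cases h : d.contains e = true
  · rw [if_pos h]
  · rw [if_neg h]
    have hfalse : d.contains e = false := by simpa using h
    simp only [PySem.Dict.modify]
    rw [PySem.Dict.getD_insert_self, PySem.Dict.insert_insert_self,
      PySem.Dict.getD_of_not_contains d 0 hfalse]

-- A's dict is Counter(edge list)
lemma pvWalls_eq_counter (triangles : List (Int × Int × Int)) :
    triangles.foldl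
      (fun walls triangle =>
        (PySem.List.pyRange 0 3 1).foldl (fun walls i => pvWallStep walls triangle i) walls)
      PySem.Dict.empty
      = PySem.Dict.counter (triangles.flatMap pvEdgesB) := by
  have h1 : triangles.foldl
      (fun walls triangle =>
        (PySem.List.pyRange 0 3 1).foldl (fun walls i => pvWallStep walls triangle i) walls)
      PySem.Dict.empty
      = (triangles.flatMap pvEdgesB).foldl pvStepA PySem.Dict.empty := by
    rw [List.foldl_flatMap]
    exact List.foldl_ext _ _ _ (fun acc t _ => pvInner_eq acc t)
  rw [h1, PySem.Dict.counter_eq_foldl]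
  exact List.foldl_ext _ _ _ (fun acc e _ => pvStepA_eq acc e)

-- characterisation of B's pass: true iff no edge's total count (together with what the incoming
-- state already accounts for) exceeds 2
lemma pvAltGo_eq (es : List (Int × Int)) (s1 s2 : PySem.Set (Int × Int))
    (h12 : ∀ e, e ∈ s2 → e ∉ s1) :
    pvAltGo es s1 s2
      = decide (∀ e ∈ es,
          es.count e + (if e ∈ s2 then 2 else if e ∈ s1 then 1 else 0) ≤ 2) := by
  induction es generalizing s1 s2 with
  | nil => simp [pvAltGo]
  | cons e es ih =>
    simp only [pvAltGo]
    by_cases h2 : e ∈ s2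
    · rw [if_pos ((PySem.Set.contains_iff s2 e).2 h2)]
      symm
      rw [decide_eq_false_iff_not]
      intro hall
      have h := hall e (List.mem_cons_self ..)
      rw [List.count_cons_self, if_pos h2] at h
      omega
    · have hc2 : s2.contains e = false := by
        rw [← Bool.not_eq_true]
        exact fun hc => h2 ((PySem.Set.contains_iff s2 e).1 hc)
      rw [if_neg (by rw [hc2]; exact Bool.false_ne_true)]
      by_cases h1 : e ∈ s1
      · have hdisj : ∀ x, x ∈ s2.add e → x ∉ s1.discard e := by
          intro x hx hmem
          rcases (PySem.Set.mem_add s2 e x).1 hx with h | h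
          · exact h12 x h ((PySem.Set.mem_discard s1 e x).1 hmem).1
          · exact ((PySem.Set.mem_discard s1 e x).1 hmem).2 h
        rw [if_pos ((PySem.Set.contains_iff s1 e).2 h1), ih _ _ hdisj, decide_eq_decide]
        have hF : ∀ x : Int × Int, x ≠ e →
            (if x ∈ s2.add e then 2 else if x ∈ s1.discard e then 1 else 0)
              = (if x ∈ s2 then 2 else if x ∈ s1 then 1 else 0) := by
          intro x hxe
          simp [PySem.Set.mem_add, PySem.Set.mem_discard, hxe]
        constructor
        · intro hall x hx
          by_cases hxe : x = e
          · subst hxe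
            rw [List.count_cons_self, if_neg h2, if_pos h1]
            by_cases hmem : x ∈ es
            · have h := hall x hmem
              rw [if_pos ((PySem.Set.mem_add s2 x x).2 (Or.inr rfl))] at h
              have hpos := List.count_pos_iff.2 hmem
              omega
            · have h0 : es.count x = 0 := List.count_eq_zero.2 hmem
              omega
          · rcases List.mem_cons.1 hx with h | h
            · exact absurd h hxe
            · have hh := hall x h
              rw [hF x hxe] at hh
              rw [List.count_cons_of_ne (Ne.symm hxe)]
              exact hh
        · intro hall x hx
          by_cases hxe : x = e
          · subst hxe
            have h := hall x (List.mem_cons_self ..)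
            rw [List.count_cons_self, if_neg h2, if_pos h1] at h
            rw [if_pos ((PySem.Set.mem_add s2 x x).2 (Or.inr rfl))]
            omega
          · have h := hall x (List.mem_cons_of_mem _ hx)
            rw [List.count_cons_of_ne (Ne.symm hxe)] at h
            rw [hF x hxe]
            exact h
      · have hdisj : ∀ x, x ∈ s2 → x ∉ s1.add e := by
          intro x hx hmem
          rcases (PySem.Set.mem_add s1 e x).1 hmem with h | h
          · exact h12 x hx h
          · exact h2 (h ▸ hx)
        have hc1 : s1.contains e = false := by
          rw [← Bool.not_eq_true]
          exact fun hc => h1 ((PySem.Set.contains_iff s1 e).1 hc)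
        rw [if_neg (by rw [hc1]; exact Bool.false_ne_true), ih _ _ hdisj, decide_eq_decide]
        have hF : ∀ x : Int × Int, x ≠ e →
            (if x ∈ s2 then 2 else if x ∈ s1.add e then 1 else 0)
              = (if x ∈ s2 then 2 else if x ∈ s1 then 1 else 0) := by
          intro x hxe
          simp [PySem.Set.mem_add, hxe]
        constructor
        · intro hall x hx
          by_cases hxe : x = e
          · subst hxe
            rw [List.count_cons_self, if_neg h2, if_neg h1]
            by_cases hmem : x ∈ es
            · have h := hall x hmem
              rw [if_neg h2, if_pos ((PySem.Set.mem_add s1 x x).2 (Or.inr rfl))] at h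
              omega
            · have h0 : es.count x = 0 := List.count_eq_zero.2 hmem
              omega
          · rcases List.mem_cons.1 hx with h | h
            · exact absurd h hxe
            · have hh := hall x h
              rw [hF x hxe] at hh
              rw [List.count_cons_of_ne (Ne.symm hxe)]
              exact hh
        · intro hall x hx
          by_cases hxe : x = e
          · subst hxe
            have h := hall x (List.mem_cons_self ..)
            rw [List.count_cons_self, if_neg h2, if_neg h1] at h
            rw [if_neg h2, if_pos ((PySem.Set.mem_add s1 x x).2 (Or.inr rfl))]
            omega
          · have h := hall x (List.mem_cons_of_mem _ hx)
            rw [List.count_cons_of_ne (Ne.symm hxe)] at h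
            rw [hF x hxe]
            exact h

-- A's validation scan over the Counter's items, characterised the same way
lemma pvScanA_eq (L : List (Int × Int)) :
    ((PySem.Dict.counter L).items.any (fun p => decide (p.2 > 2) || decide (p.2 < 1)) = false)
      ↔ (∀ e ∈ L, L.count e ≤ 2) := by
  rw [PySem.Dict.items_counter]
  rw [List.any_map, List.any_eq_false]
  constructor
  · intro h e he
    have hh := h e ((PySem.Set.mem_ofList L e).2 he)
    simp only [Function.comp, Bool.or_eq_true, decide_eq_true_eq, not_or] at hh
    omega
  · intro h e he
    have he' := (PySem.Set.mem_ofList L e).1 he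
    have hle := h e he'
    have hpos : 0 < L.count e := List.count_pos_iff.2 he'
    simp only [Function.comp, Bool.or_eq_true, decide_eq_true_eq, not_or]
    omega

-- ===== VERDICT (by name: the statement is the Claim_ definition above) =====
theorem is_valid_triangles_py_spec : Claim_equal_is_valid_triangles_py := by
  intro n triangles _
  unfold Spec_is_valid_triangles_py is_valid_triangles_py is_valid_triangles_py_alt
  by_cases hlen : (triangles.length : Int) ≠ n - 2
  · simp only [if_pos hlen]
  · simp only [if_neg hlen]
    rw [pvWalls_eq_counter]
    rw [pvAltGo_eq (triangles.flatMap pvEdgesB) PySem.Set.empty PySem.Set.empty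
      (fun e h => by simp [PySem.Set.empty] at h)]
    by_cases hA : (PySem.Dict.counter (triangles.flatMap pvEdgesB)).items.any
        (fun p => decide (p.2 > 2) || decide (p.2 < 1)) = false
    · have hch := (pvScanA_eq _).1 hA
      rw [hA]
      symm
      rw [if_neg (by simp), decide_eq_true_eq]
      intro e he
      have := hch e he
      simp [PySem.Set.empty, this]
    · rw [Bool.not_eq_false] at hA
      rw [if_pos hA]
      symm
      rw [decide_eq_false_iff_not]
      intro hall
      have : ∀ e ∈ triangles.flatMap pvEdgesB, (triangles.flatMap pvEdgesB).count e ≤ 2 := by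
        intro e he
        have h := hall e he
        simp [PySem.Set.empty] at h
        omega
      rw [← pvScanA_eq _] at this
      rw [this] at hA
      exact Bool.false_ne_true hA
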